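-- pv_equiv track=rewrite | github.com/zelshey/DailyProgrammer | yahtzee_upper.py | yahtzee_upper
-- ===== SOURCE A (Python) =====
-- def yahtzee_upper(_arr):
-- 	d = dict()
-- 	for n in _arr:
-- 		if(not (n in d)): d[n] = 0
-- 		d[n] += 1
-- 	m = 0
-- 	for k in d:
-- 		m = max(m, d[k]*k)
-- 	return m
-- ===== SOURCE B (Python) =====
-- def yahtzee_upper(_arr):
-- 	m = 0
-- 	prev = 0
-- 	count = 0
-- 	for v in sorted(_arr):
-- 		if count > 0 and v == prev:
-- 			count += 1
-- 		else:
-- 			if count > 0: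
-- 				m = max(m, prev * count)
-- 			prev = v
-- 			count = 1
-- 	if count > 0:
-- 		m = max(m, prev * count)
-- 	return m
-- ===== Notes on version B (the rewrite author's own statement) =====
-- stated objective: alternative
-- what changed: Replaces the hash-counter dict plus a second max loop over its keys with a sort followed by a single run-length scan that finalizes value*runlength at each run boundary.
import Mathlib
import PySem

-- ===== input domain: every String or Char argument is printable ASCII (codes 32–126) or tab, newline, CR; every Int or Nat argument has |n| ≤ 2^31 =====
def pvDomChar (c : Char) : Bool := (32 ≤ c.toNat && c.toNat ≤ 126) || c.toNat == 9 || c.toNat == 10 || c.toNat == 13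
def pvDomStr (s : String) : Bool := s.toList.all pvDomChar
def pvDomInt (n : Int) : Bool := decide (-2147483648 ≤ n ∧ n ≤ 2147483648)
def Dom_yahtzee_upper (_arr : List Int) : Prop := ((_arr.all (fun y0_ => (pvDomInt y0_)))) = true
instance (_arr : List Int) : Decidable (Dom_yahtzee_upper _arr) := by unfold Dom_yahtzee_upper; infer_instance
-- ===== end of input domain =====

-- B replaces A's hash-counter dict and second max loop by a sort plus one run-length scan (alternative decomposition, same results).

-- ===== PORT A =====
-- counter loop: 'if not (n in d): d[n] = 0' then 'd[n] += 1'
def yahtzee_upper (_arr : List Int) : Int :=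
  let d := _arr.foldl (fun d n =>
      let d1 := if d.contains n then d else d.insert n 0
      d1.insert n (d1.getD n 0 + 1)) PySem.Dict.empty
  d.keys.foldl (fun m k => max m (d.getD k 0 * k)) 0

-- ===== PORT B =====
-- loop body of Source B: state (m, prev, count)
def bStep (st : Int × Int × Int) (v : Int) : Int × Int × Int :=
  if st.2.2 > 0 ∧ v = st.2.1 then (st.1, st.2.1, st.2.2 + 1)
  else ((if st.2.2 > 0 then max st.1 (st.2.1 * st.2.2) else st.1), v, 1)

-- the trailing 'if count > 0: m = max(m, prev * count)' of Source B
def bFin (st : Int × Int × Int) : Int :=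
  if st.2.2 > 0 then max st.1 (st.2.1 * st.2.2) else st.1

def yahtzee_upper_alt (_arr : List Int) : Int :=
  bFin ((PySem.List.sorted _arr (fun x => x) false).foldl bStep (0, 0, 0))

-- ===== PRECONDITION & SPEC =====
def Spec_yahtzee_upper (_arr : List Int) (out : Int) : Prop := out = yahtzee_upper_alt _arr
instance (_arr : List Int) (out : Int) : Decidable (Spec_yahtzee_upper _arr out) := by unfold Spec_yahtzee_upper; infer_instance

-- ===== CLAIM (what is proved, stated in full; the proofs are below) =====
def Claim_equal_yahtzee_upper : Prop := ∀ (_arr : List Int), Dom_yahtzee_upper _arr → Spec_yahtzee_upper _arr (yahtzee_upper _arr)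

-- ===== LEMMAS AND PROOFS =====

-- running max of f over a list: invariance under same membership
theorem maxfold_le_maxfold (f : Int → Int) (l1 l2 : List Int) (a b : Int)
    (hab : a ≤ b) (hsub : ∀ x ∈ l1, x ∈ l2) :
    l1.foldl (fun m k => max m (f k)) a ≤ l2.foldl (fun m k => max m (f k)) b := by
  have h1 : l1.foldl (fun m k => max m (f k)) a = (l1.map f).foldl max a := by
    rw [List.foldl_map]
  rw [h1]
  rcases PySem.List.foldl_max_mem (l1.map f) a with h | h
  · rw [h]
    exact le_trans hab (PySem.List.le_foldl_max_int l2 f b).1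
  · rcases List.mem_map.mp h with ⟨x, hx, hfx⟩
    rw [← hfx]
    exact (PySem.List.le_foldl_max_int l2 f b).2 x (hsub x hx)

theorem maxfold_congr_mem (f : Int → Int) (l1 l2 : List Int) (a : Int)
    (h : ∀ x, x ∈ l1 ↔ x ∈ l2) :
    l1.foldl (fun m k => max m (f k)) a = l2.foldl (fun m k => max m (f k)) a :=
  le_antisymm (maxfold_le_maxfold f l1 l2 a a le_rfl (fun x hx => (h x).mp hx))
    (maxfold_le_maxfold f l2 l1 a a le_rfl (fun x hx => (h x).mpr hx))

theorem foldl_setadd_cons (l : List Int) (a : Int) (h : a ∉ l) :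
    ∀ s : List Int, l.foldl PySem.Set.add (a :: s) = a :: l.foldl PySem.Set.add s := by
  induction l with
  | nil => intro s; rfl
  | cons x t ih =>
    intro s
    have hxa : x ≠ a := fun hxa => h (hxa ▸ List.mem_cons_self)
    have ht : a ∉ t := fun ha => h (List.mem_cons_of_mem _ ha)
    have hc : PySem.Set.contains (a :: s) x = PySem.Set.contains s x := by
      simp [PySem.Set.contains, hxa]
    simp only [List.foldl_cons, PySem.Set.add, hc]
    by_cases hcs : PySem.Set.contains s x = true
    · simp only [hcs, if_true]; exact ih ht s
    · simp only [hcs, List.cons_append]; exact ih ht (s ++ [x])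

theorem ofList_cons_of_not_mem (a : Int) (l : List Int) (h : a ∉ l) :
    PySem.Set.ofList (a :: l) = a :: PySem.Set.ofList l := by
  rw [PySem.Set.ofList_eq_foldl, PySem.Set.ofList_eq_foldl, List.foldl_cons]
  have : PySem.Set.add ([] : List Int) a = [a] := rfl
  rw [this]
  exact foldl_setadd_cons l a h []

theorem ofList_cons_cons_self (p : Int) (t : List Int) :
    PySem.Set.ofList (p :: p :: t) = PySem.Set.ofList (p :: t) := by
  rw [PySem.Set.ofList_eq_foldl, PySem.Set.ofList_eq_foldl, List.foldl_cons, List.foldl_cons,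
    List.foldl_cons]
  have h1 : PySem.Set.add ([] : List Int) p = [p] := rfl
  have h2 : PySem.Set.add [p] p = [p] := by simp [PySem.Set.add, PySem.Set.contains]
  rw [h1, h2]

-- the run-length scan on a sorted tail computes the running max of count·value
theorem run_lemma (s : List Int) (hs : s.Pairwise (· ≤ ·)) :
    ∀ (m p c : Int), 0 < c → (∀ x ∈ s, p ≤ x) →
    bFin (s.foldl bStep (m, p, c)) =
      (PySem.Set.ofList (p :: s)).foldl
        (fun acc k => max acc (((List.replicate c.toNat p ++ s).count k : Int) * k)) m := by
  induction s with
  | nil =>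
    intro m p c hc _
    have hset : PySem.Set.ofList [p] = [p] := rfl
    simp only [List.foldl_nil, bFin, hset, List.append_nil, List.count_replicate_self,
      List.foldl_cons]
    have hcn : ((c.toNat : Int)) = c := Int.toNat_of_nonneg (le_of_lt hc)
    rw [hcn]
    simp only [hc, if_true, mul_comm]
  | cons v t ih =>
    intro m p c hc hp
    have hpv : p ≤ v := hp v List.mem_cons_self
    have hvt : ∀ x ∈ t, v ≤ x := (List.pairwise_cons.mp hs).1
    have ht : t.Pairwise (· ≤ ·) := (List.pairwise_cons.mp hs).2
    by_cases hvp : v = p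
    · -- run continues
      have hstep : bStep (m, p, c) v = (m, p, c + 1) := by
        simp [bStep, hc, hvp]
      rw [List.foldl_cons, hstep,
        ih ht m p (c + 1) (by omega) (fun x hx => hvp ▸ hvt x hx)]
      subst hvp
      rw [ofList_cons_cons_self]
      apply PySem.List.foldl_congr_mem
      intro acc k _
      have hcount : (List.replicate (c + 1).toNat v ++ t).count k =
          (List.replicate c.toNat v ++ v :: t).count k := by
        have : (c + 1).toNat = c.toNat + 1 := by omega
        rw [this]
        simp only [List.count_append, List.count_replicate, List.count_cons]
        split_ifs <;> omega
      rw [hcount]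
    · -- run boundary
      have hplt : p < v := lt_of_le_of_ne hpv (fun h => hvp h.symm)
      have hstep : bStep (m, p, c) v = (max m (p * c), v, 1) := by
        simp [bStep, hc, hvp]
      have hpn : p ∉ v :: t := by
        intro hmem
        rcases List.mem_cons.mp hmem with h | h
        · omega
        · have := hvt p h; omega
      rw [List.foldl_cons, hstep, ih ht (max m (p * c)) v 1 one_pos hvt,
        ofList_cons_of_not_mem p (v :: t) hpn, List.foldl_cons]
      have hfp : ((List.replicate c.toNat p ++ v :: t).count p : Int) * p = p * c := by
        have h0 : (v :: t).count p = 0 := List.count_eq_zero.mpr hpn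
        have hcn : ((c.toNat : Nat) : Int) = c := Int.toNat_of_nonneg (le_of_lt hc)
        simp only [List.count_append, List.count_replicate_self, h0, Nat.add_zero, hcn,
          mul_comm]
      rw [hfp]
      apply PySem.List.foldl_congr_mem
      intro acc k hk
      have hkmem : k ∈ v :: t := by
        have := (PySem.Set.mem_ofList (v :: t) k).mp hk
        exact this
      have hknp : k ≠ p := fun h => hpn (h ▸ hkmem)
      have hcount : ((List.replicate (1 : Int).toNat v ++ t).count k) =
          ((List.replicate c.toNat p ++ v :: t).count k) := by
        have hpk : ¬ (p = k) := fun h => hknp h.symm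
        simp only [List.count_append, List.count_replicate, List.count_cons, beq_iff_eq]
        split_ifs <;> push_cast <;> omega
      rw [hcount]

-- A computes the running max of count·value over the distinct elements
theorem a_char (arr : List Int) :
    yahtzee_upper arr =
      (PySem.Set.ofList arr).foldl (fun m k => max m ((arr.count k : Int) * k)) 0 := by
  unfold yahtzee_upper
  have hstep : (fun (d : PySem.Dict Int Int) (n : Int) =>
      let d1 := if d.contains n then d else d.insert n 0
      d1.insert n (d1.getD n 0 + 1)) =
      (fun (d : PySem.Dict Int Int) (n : Int) => d.insert n (d.getD n 0 + 1)) := by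
    funext d n
    by_cases hc : d.contains n
    · simp [hc]
    · simp only [hc, Bool.false_eq_true, if_false]
      rw [PySem.Dict.getD_insert_self, PySem.Dict.insert_insert_self,
        PySem.Dict.getD_of_not_contains d 0 (by simpa using hc)]
  rw [hstep, PySem.Dict.foldl_insert_getD_add_one_eq_counter]
  show List.foldl (fun m k => max m ((PySem.Dict.counter arr).getD k 0 * k)) 0
      (PySem.Dict.counter arr).keys = _
  rw [PySem.Dict.keys_counter]
  apply PySem.List.foldl_congr_mem
  intro acc k _
  rw [PySem.Dict.getD_counter]

-- ===== VERDICT (by name: the statement is the Claim_ definition above) =====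
theorem yahtzee_upper_spec : Claim_equal_yahtzee_upper := by
  intro arr _
  unfold Spec_yahtzee_upper
  rw [a_char]
  unfold yahtzee_upper_alt
  rcases hs : PySem.List.sorted arr (fun x => x) false with _ | ⟨v, t⟩
  · have harr : arr = [] := (PySem.List.sorted_eq_nil_iff arr (fun x => x) false).mp hs
    subst harr
    rfl
  · have hperm : (v :: t).Perm arr := hs ▸ PySem.List.sorted_perm arr (fun x => x) false
    have hpair : (v :: t).Pairwise (· ≤ ·) := by
      have := PySem.List.sorted_pairwise arr (fun x => x)
      rw [hs] at this
      exact this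
    have hstep0 : bStep (0, 0, 0) v = (0, v, 1) := by simp [bStep]
    rw [List.foldl_cons, hstep0,
      run_lemma t (List.pairwise_cons.mp hpair).2 0 v 1 one_pos (List.pairwise_cons.mp hpair).1]
    have hrepl : List.replicate (1 : Int).toNat v ++ t = v :: t := rfl
    rw [hrepl]
    have hcnt : ∀ acc k, k ∈ PySem.Set.ofList (v :: t) →
        (fun acc k => max acc (((v :: t).count k : Int) * k)) acc k =
        (fun acc k => max acc ((arr.count k : Int) * k)) acc k := by
      intro acc k _
      simp only [hperm.count_eq]
    rw [PySem.List.foldl_congr_mem _ _ _ _ (fun acc x hx => hcnt acc x hx)]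
    apply (maxfold_congr_mem (fun k => (arr.count k : Int) * k) _ _ 0 _).symm
    intro x
    rw [PySem.Set.mem_ofList, PySem.Set.mem_ofList]
    exact hperm.mem_iff
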